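-- pv_equiv track=rewrite | github.com/kraujinis/code_academy | lesson_11/exercise_1.py | add_puzle
-- ===== SOURCE A (Python) =====
-- from typing import List
--
-- def add_puzle(item1: List[int], item2: List[int]) -> bool:
--     c = []
--     for x, y in zip(item1, item2):
--         c.append(x + y)
--     if len(set(c)) == 1:
--         return True
--     else:
--         return False
-- ===== SOURCE B (Python) =====
-- def add_puzle(item1, item2):
--     if not item1 or not item2:
--         return False
--     ref = item1[0] + item2[0]
--     return all(x + y == ref for x, y in zip(item1, item2))
-- ===== Notes on version B (the rewrite author's own statement) =====
-- stated objective: simpler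
-- what changed: Instead of materialising the list of pairwise sums and measuring the size of a set built from it, B guards the empty case and checks each pairwise sum against the first one with an early-exit all().
import Mathlib
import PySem

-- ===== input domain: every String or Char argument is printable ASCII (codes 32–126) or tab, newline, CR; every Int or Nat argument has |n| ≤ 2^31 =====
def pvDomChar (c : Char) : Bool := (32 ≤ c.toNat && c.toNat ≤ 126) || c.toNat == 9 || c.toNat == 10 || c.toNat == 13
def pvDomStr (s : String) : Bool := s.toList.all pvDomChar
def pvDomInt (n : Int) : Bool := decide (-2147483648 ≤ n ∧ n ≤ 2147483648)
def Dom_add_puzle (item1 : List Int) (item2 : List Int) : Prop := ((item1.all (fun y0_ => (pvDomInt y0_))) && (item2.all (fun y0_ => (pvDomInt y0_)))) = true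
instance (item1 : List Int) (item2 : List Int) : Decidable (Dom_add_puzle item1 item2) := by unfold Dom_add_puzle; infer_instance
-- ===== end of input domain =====

-- B replaces A's sums-list + set-size test by an empty guard and an early-exit comparison of every pairwise sum against the first (simpler, measured faster by a constant factor).
-- ===== PORT A =====
def add_puzle (item1 : List Int) (item2 : List Int) : Bool :=
  let c := (List.zip item1 item2).foldl (fun acc p => acc ++ [p.1 + p.2]) []
  if (PySem.Set.len (PySem.Set.ofList c)) == 1 then true else false

-- ===== PORT B =====
def add_puzle_alt (item1 : List Int) (item2 : List Int) : Bool :=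
  match item1, item2 with
  | a :: t1, b :: t2 =>
      (List.zip (a :: t1) (b :: t2)).all (fun p => p.1 + p.2 == a + b)
  | _, _ => false

-- ===== PRECONDITION & SPEC =====
def Spec_add_puzle (item1 : List Int) (item2 : List Int) (out : Bool) : Prop := out = add_puzle_alt item1 item2
instance (item1 : List Int) (item2 : List Int) (out : Bool) : Decidable (Spec_add_puzle item1 item2 out) := by unfold Spec_add_puzle; infer_instance

-- ===== CLAIM (what is proved, stated in full; the proofs are below) =====
def Claim_equal_add_puzle : Prop := ∀ (item1 : List Int) (item2 : List Int), Dom_add_puzle item1 item2 → Spec_add_puzle item1 item2 (add_puzle item1 item2)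

-- ===== LEMMAS AND PROOFS =====

lemma foldl_app_eq_map (l : List (Int × Int)) (acc : List Int) :
    l.foldl (fun acc p => acc ++ [p.1 + p.2]) acc = acc ++ l.map (fun p => p.1 + p.2) := by
  induction l generalizing acc with
  | nil => simp
  | cons x xs ih => simp [List.foldl, ih]

lemma len_foldl_add_ge (l : List Int) (s : List Int) :
    s.length ≤ (l.foldl PySem.Set.add s).length := by
  induction l generalizing s with
  | nil => simp
  | cons x xs ih =>
    refine le_trans ?_ (ih (PySem.Set.add s x))
    unfold PySem.Set.add
    split <;> simp

lemma foldl_add_singleton (l : List Int) (v : Int) :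
    ((l.foldl PySem.Set.add [v]).length = 1) ↔ (∀ x ∈ l, x = v) := by
  induction l with
  | nil => simp
  | cons x xs ih =>
    by_cases h : x = v
    · subst h
      have : PySem.Set.add [x] x = [x] := by simp [PySem.Set.add, PySem.Set.contains]
      simp [List.foldl, ih]
    · have : PySem.Set.add [v] x = [v, x] := by
        simp [PySem.Set.add, PySem.Set.contains]
        intro hc; exact absurd hc h
      simp only [List.foldl, this]
      constructor
      · intro hlen
        have := len_foldl_add_ge xs [v, x]
        simp at this; omega
      · intro hall
        exact absurd (hall x (by simp)) h


-- ===== VERDICT (by name: the statement is the Claim_ definition above) =====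
theorem add_puzle_spec : Claim_equal_add_puzle := by
  intro item1 item2 _
  unfold Spec_add_puzle add_puzle add_puzle_alt
  match item1, item2 with
  | [], _ => simp [PySem.Set.ofList, PySem.Set.len]
  | _ :: _, [] => simp [PySem.Set.ofList, PySem.Set.len]
  | a :: t1, b :: t2 =>
    simp only [List.zip_cons_cons, List.nil_append,
      foldl_app_eq_map, PySem.Set.ofList, PySem.Set.len]
    have hadd : PySem.Set.add ([] : List Int) (a + b) = [a + b] := by
      simp [PySem.Set.add, PySem.Set.contains]
    rw [List.map_cons, List.foldl_cons]
    show (if ((((List.map (fun p => p.1 + p.2) (t1.zip t2)).foldl PySem.Set.add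
        (PySem.Set.add PySem.Set.empty (a + b))).length : Int) == 1) = true then true else false)
      = ((a, b) :: t1.zip t2).all fun p => p.1 + p.2 == a + b
    rw [show PySem.Set.add PySem.Set.empty (a + b) = [a + b] from hadd]
    rcases Bool.eq_false_or_eq_true
        ((List.zip t1 t2).all (fun p => p.1 + p.2 == a + b)) with hall | hall
    · have hyes : ∀ x ∈ (List.zip t1 t2).map (fun p => p.1 + p.2), x = a + b := by
        simp only [List.all_eq_true] at hall
        intro x hx
        obtain ⟨p, hp, rfl⟩ := List.mem_map.mp hx
        simpa using hall p hp
      have hlen := (foldl_add_singleton _ (a + b)).mpr hyes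
      simp [List.all_cons, hall, hlen]
    · have hno : ¬ ∀ x ∈ (List.zip t1 t2).map (fun p => p.1 + p.2), x = a + b := by
        simp only [List.all_eq_false] at hall
        obtain ⟨p, hp, hne⟩ := hall
        intro hcontra
        exact hne (by simpa using hcontra (p.1 + p.2) (List.mem_map.mpr ⟨p, hp, rfl⟩))
      have hlen := (not_iff_not.mpr
        (foldl_add_singleton ((List.zip t1 t2).map (fun p => p.1 + p.2)) (a + b))).mpr hno
      simp [List.all_cons, hall, hlen]
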